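-- pv_equiv track=rewrite | github.com/jamerrq/cp2023 | Codeforces/div4/round_898/E.py | custom_binary_search
-- ===== SOURCE A (Python) =====
-- def total_water_needed(arr, h):
--     # suponemos que el arreglo está ordenado
--     ans = 0
--     for i in range(len(arr)):
--         ans += max(0, h - arr[i])
--     return ans
--
-- def custom_binary_search(arr, x):
--
--     l = 0
--     r = 2 * x + 1
--     ans = -1
--
--     while l <= r:
--
--         mid = l + (r - l) // 2
--         xmd = total_water_needed(arr, mid)
--
--         if xmd <= x:
--             ans = mid
--             l = mid + 1
--
--         else:
--             r = mid - 1
--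
--     return ans
-- ===== SOURCE B (Python) =====
-- from bisect import bisect_left
--
--
-- def custom_binary_search(arr, x):
--     if x < 0:
--         return -1
--     s = sorted(arr)
--     pref = [0]
--     for v in s:
--         pref.append(pref[-1] + v)
--
--     def water(h):
--         k = bisect_left(s, h)
--         return k * h - pref[k]
--
--     if water(0) > x:
--         return -1
--     lo, hi = 0, 2 * x + 1
--     while lo < hi:
--         mid = (lo + hi + 1) // 2
--         if water(mid) <= x:
--             lo = mid
--         else:
--             hi = mid - 1
--     return lo
-- ===== Notes on version B (the rewrite author's own statement) =====
-- stated objective: faster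
-- what changed: A recomputes the O(n) water sum from scratch at every binary-search probe; B sorts the array once, builds prefix sums, and answers each probe with a bisect lookup (k*h - pref[k]) in O(log n).
import Mathlib
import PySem

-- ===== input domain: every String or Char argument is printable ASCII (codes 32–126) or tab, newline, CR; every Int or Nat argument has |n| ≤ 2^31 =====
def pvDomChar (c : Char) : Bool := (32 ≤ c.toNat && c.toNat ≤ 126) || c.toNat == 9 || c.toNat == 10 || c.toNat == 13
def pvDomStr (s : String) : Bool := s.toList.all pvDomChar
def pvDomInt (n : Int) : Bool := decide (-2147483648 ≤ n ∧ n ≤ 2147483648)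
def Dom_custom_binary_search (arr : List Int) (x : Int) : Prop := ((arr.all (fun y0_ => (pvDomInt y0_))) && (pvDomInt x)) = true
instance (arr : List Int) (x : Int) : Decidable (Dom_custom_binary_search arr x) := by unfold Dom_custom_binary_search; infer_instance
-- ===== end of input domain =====

-- B replaces A's O(n) water-sum recomputed at every binary-search probe by sort +
-- prefix sums, answering each probe with a bisect lookup (alternative algorithm).

-- ===== PORT A =====
def total_water_needed (arr : List Int) (h : Int) : Int :=
  (PySem.List.pyRange 0 arr.length 1).foldl
    (fun ans i => ans + max 0 (h - PySem.List.pyGetD arr i 0)) 0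

def pvALoop (arr : List Int) (x l r ans : Int) : Int :=
  if _hlr : l ≤ r then
    let mid := l + PySem.Int.floordiv (r - l) 2
    if total_water_needed arr mid ≤ x then
      pvALoop arr x (mid + 1) r mid
    else
      pvALoop arr x l (mid - 1) ans
  else ans
termination_by (r + 1 - l).toNat
decreasing_by
  · have := PySem.Int.floordiv_two_mid_bounds (show (0:Int) ≤ 0 + (r - l) by omega)
    simp only [zero_add] at this
    omega
  · have := PySem.Int.floordiv_two_mid_bounds (show (0:Int) ≤ 0 + (r - l) by omega)
    simp only [zero_add] at this
    omega

def custom_binary_search (arr : List Int) (x : Int) : Int :=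
  pvALoop arr x 0 (2 * x + 1) (-1)

-- ===== PORT B =====
-- pref = [0]; for v in s: pref.append(pref[-1] + v)
def pvPref (s : List Int) : List Int :=
  s.foldl (fun p v => p ++ [PySem.List.pyGetD p (-1) 0 + v]) [0]

-- def water(h): k = bisect_left(s, h); return k * h - pref[k]
def pvWater (s pref : List Int) (hgt : Int) : Int :=
  let k := PySem.List.bisectLeft s hgt
  (k : Int) * hgt - PySem.List.pyGetD pref (k : Int) 0

def pvBLoop (s pref : List Int) (x lo hi : Int) : Int :=
  if _hlh : lo < hi then
    let mid := PySem.Int.floordiv (lo + hi + 1) 2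
    if pvWater s pref mid ≤ x then
      pvBLoop s pref x mid hi
    else
      pvBLoop s pref x lo (mid - 1)
  else lo
termination_by (hi - lo).toNat
decreasing_by
  · have := PySem.Int.floordiv_two_mid_bounds (show lo + 1 ≤ hi by omega)
    have h2 : lo + hi + 1 = (lo + 1) + hi := by ring
    rw [h2] at *
    omega
  · have := PySem.Int.floordiv_two_mid_bounds (show lo + 1 ≤ hi by omega)
    have h2 : lo + hi + 1 = (lo + 1) + hi := by ring
    rw [h2] at *
    omega

def custom_binary_search_alt (arr : List Int) (x : Int) : Int :=
  if x < 0 then -1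
  else
    let s := PySem.List.sorted arr (fun a => a)
    let pref := pvPref s
    if pvWater s pref 0 > x then -1
    else pvBLoop s pref x 0 (2 * x + 1)

-- ===== PRECONDITION & SPEC =====
def Spec_custom_binary_search (arr : List Int) (x : Int) (out : Int) : Prop := out = custom_binary_search_alt arr x
instance (arr : List Int) (x : Int) (out : Int) : Decidable (Spec_custom_binary_search arr x out) := by unfold Spec_custom_binary_search; infer_instance

-- ===== CLAIM (what is proved, stated in full; the proofs are below) =====
def Claim_equal_custom_binary_search : Prop := ∀ (arr : List Int) (x : Int), Dom_custom_binary_search arr x → Spec_custom_binary_search arr x (custom_binary_search arr x)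

-- ===== LEMMAS AND PROOFS =====

-- reference value of A's water sum
def pvW (arr : List Int) (h : Int) : Int := (arr.map (fun a => max 0 (h - a))).sum

theorem pvFoldl_sum (g : Int → Int) (arr : List Int) (init : Int) :
    arr.foldl (fun acc a => acc + g a) init = init + (arr.map g).sum := by
  induction arr generalizing init with
  | nil => simp
  | cons a t ih => simp [List.foldl_cons, ih]; ring

theorem pvW_twn (arr : List Int) (h : Int) : total_water_needed arr h = pvW arr h := by
  unfold total_water_needed pvW
  rw [PySem.List.foldl_pyRange_zero_pyGetD' arr 0 (fun ans a => ans + max 0 (h - a)) 0]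
  rw [pvFoldl_sum]
  ring

theorem pvW_mono (arr : List Int) {h h' : Int} (hh : h ≤ h') : pvW arr h ≤ pvW arr h' := by
  unfold pvW
  induction arr with
  | nil => simp
  | cons a t ih =>
    simp only [List.map_cons, List.sum_cons]
    have : max 0 (h - a) ≤ max 0 (h' - a) := by omega
    omega

theorem pvW_perm {arr arr' : List Int} (hp : arr.Perm arr') (h : Int) : pvW arr h = pvW arr' h := by
  unfold pvW
  exact (hp.map _).sum_eq

-- characterization of the answer: the largest admissible height in [0, 2x+1], else -1
def pvRes (arr : List Int) (x v : Int) : Prop :=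
  (v = -1 ∨ (0 ≤ v ∧ v ≤ 2 * x + 1 ∧ pvW arr v ≤ x)) ∧
  (∀ h : Int, 0 ≤ h → h ≤ 2 * x + 1 → pvW arr h ≤ x → h ≤ v)

theorem pvRes_unique {arr : List Int} {x v w : Int} (hv : pvRes arr x v) (hw : pvRes arr x w) : v = w := by
  obtain ⟨hv1, hv2⟩ := hv
  obtain ⟨hw1, hw2⟩ := hw
  rcases hv1 with rfl | ⟨hv0, hvb, hvg⟩
  · rcases hw1 with rfl | ⟨hw0, hwb, hwg⟩
    · rfl
    · have := hv2 w hw0 hwb hwg; omega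
  · rcases hw1 with rfl | ⟨hw0, hwb, hwg⟩
    · have := hw2 v hv0 hvb hvg; omega
    · have := hv2 w hw0 hwb hwg
      have := hw2 v hv0 hvb hvg
      omega

-- A's loop meets the characterization
theorem pvALoop_res (arr : List Int) (x l r : Int) (hl : 0 ≤ l) (hr : r ≤ 2 * x + 1)
    (hgood : l = 0 ∨ (l ≤ r + 1 ∧ pvW arr (l - 1) ≤ x))
    (hbad : ∀ h : Int, r < h → h ≤ 2 * x + 1 → ¬ pvW arr h ≤ x) :
    pvRes arr x (pvALoop arr x l r (l - 1)) := by
  rw [pvALoop]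
  by_cases hlr : l ≤ r
  · rw [dif_pos hlr]
    have hmid := PySem.Int.floordiv_two_mid_bounds (show (0:Int) ≤ 0 + (r - l) by omega)
    simp only [zero_add] at hmid
    show pvRes arr x
      (if total_water_needed arr (l + PySem.Int.floordiv (r - l) 2) ≤ x then
        pvALoop arr x (l + PySem.Int.floordiv (r - l) 2 + 1) r (l + PySem.Int.floordiv (r - l) 2)
      else pvALoop arr x l (l + PySem.Int.floordiv (r - l) 2 - 1) (l - 1))
    set mid := l + PySem.Int.floordiv (r - l) 2 with hmiddef
    by_cases hg : total_water_needed arr mid ≤ x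
    · rw [if_pos hg, pvW_twn] at *
      have hrec := pvALoop_res arr x (mid + 1) r (by omega) hr
        (Or.inr ⟨by omega, by simpa using hg⟩) hbad
      simpa using hrec
    · rw [if_neg hg] at *
      rw [pvW_twn] at hg
      refine pvALoop_res arr x l (mid - 1) hl (by omega) ?_
        (fun h h1 h2 hle => hg (le_trans (pvW_mono arr (show mid ≤ h by omega)) hle))
      rcases hgood with h0 | ⟨h1, h2⟩
      · exact Or.inl h0
      · exact Or.inr ⟨by omega, h2⟩
  · rw [dif_neg hlr]
    constructor
    · by_cases hl0 : l = 0
      · left; omega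
      · right
        rcases hgood with h0 | ⟨h1, h2⟩
        · exact absurd h0 hl0
        · exact ⟨by omega, by omega, h2⟩
    · intro h h0 hb2 hle
      by_contra hc
      exact hbad h (by omega) hb2 hle
termination_by (r + 1 - l).toNat
decreasing_by
  all_goals
    have hmb := PySem.Int.floordiv_two_mid_bounds (show (0:Int) ≤ 0 + (r - l) by omega)
    simp only [zero_add] at hmb ⊢
    omega

theorem pvA_res (arr : List Int) (x : Int) : pvRes arr x (custom_binary_search arr x) := by
  unfold custom_binary_search
  have h := pvALoop_res arr x 0 (2 * x + 1) le_rfl le_rfl (Or.inl rfl)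
    (fun h h1 h2 hle => by omega)
  norm_num at h
  exact h

-- B's prefix list and water lookup compute A's water sum
theorem pvPref_foldl (s q : List Int) (c : Int) :
    s.foldl (fun p v => p ++ [PySem.List.pyGetD p (-1) 0 + v]) (q ++ [c]) =
      q ++ s.scanl (· + ·) c := by
  induction s generalizing q c with
  | nil => simp
  | cons v t ih =>
    simp only [List.foldl_cons, List.scanl_cons, PySem.List.pyGetD_neg_one_append_singleton]
    rw [show (q ++ [c]) ++ [c + v] = (q ++ [c]) ++ [c + v] from rfl, ih (q ++ [c]) (c + v)]
    simp

theorem pvPref_eq (s : List Int) : pvPref s = s.scanl (· + ·) 0 := by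
  have := pvPref_foldl s [] 0
  simpa [pvPref] using this

theorem scanl_getD (s : List Int) : ∀ (c : Int) (k : Nat), k ≤ s.length →
    (s.scanl (· + ·) c).getD k 0 = c + (s.take k).sum := by
  induction s with
  | nil =>
    intro c k hk
    have : k = 0 := by simpa using hk
    subst this; simp
  | cons v t ih =>
    intro c k hk
    cases k with
    | zero => simp
    | succ k =>
      simp only [List.scanl_cons, List.getD_cons_succ, List.take_succ_cons, List.sum_cons]
      rw [ih (c + v) k (by simpa using hk)]
      ring

theorem sum_map_hsub (l : List Int) (h : Int) :
    (l.map (fun a => h - a)).sum = (l.length : Int) * h - l.sum := by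
  induction l with
  | nil => simp
  | cons a t ih => simp [ih]; ring

theorem pvWater_eq (arr : List Int) (h : Int) :
    pvWater (PySem.List.sorted arr (fun a => a)) (pvPref (PySem.List.sorted arr (fun a => a))) h = pvW arr h := by
  set s := PySem.List.sorted arr (fun a => a) with hs
  have hperm : s.Perm arr := PySem.List.sorted_perm arr _ _
  have hpw : s.Pairwise (· ≤ ·) := PySem.List.sorted_pairwise arr _
  obtain ⟨hk1, hk2, hk3⟩ := PySem.List.bisectLeft_spec s h hpw
  rw [← pvW_perm hperm h]
  have hrw : pvWater s (pvPref s) h =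
      ((PySem.List.bisectLeft s h : Int)) * h -
        PySem.List.pyGetD (pvPref s) ((PySem.List.bisectLeft s h : Int)) 0 := rfl
  rw [hrw]
  set k := PySem.List.bisectLeft s h with hkdef
  rw [pvPref_eq, PySem.List.pyGetD_natCast, scanl_getD s 0 k hk1, zero_add]
  have hsplit : pvW s h = pvW (s.take k) h + pvW (s.drop k) h := by
    unfold pvW
    rw [← List.sum_append, ← List.map_append, List.take_append_drop]
  have hdrop : pvW (s.drop k) h = 0 := by
    unfold pvW
    apply List.sum_eq_zero
    intro y hy
    obtain ⟨a, ha, rfl⟩ := List.mem_map.mp hy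
    obtain ⟨j, hj, rfl⟩ := List.mem_iff_getElem.mp ha
    rw [List.getElem_drop]
    simp only [List.length_drop] at hj
    have := hk3 (k + j) (by omega) (by omega)
    omega
  have htake : pvW (s.take k) h = (k : Int) * h - (s.take k).sum := by
    unfold pvW
    rw [List.map_congr_left (g := fun a => h - a) ?_, sum_map_hsub, List.length_take_of_le hk1]
    intro a ha
    obtain ⟨j, hj, rfl⟩ := List.mem_iff_getElem.mp ha
    rw [List.getElem_take]
    have := hk2 j (by simp at hj; omega) (by simp at hj; omega)
    simp only
    omega
  rw [hsplit, hdrop, htake]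
  ring

-- B's loop meets the characterization
theorem pvBLoop_res (arr : List Int) (x lo hi : Int)
    (h0 : 0 ≤ lo) (hlohi : lo ≤ hi) (hhi : hi ≤ 2 * x + 1)
    (hgood : pvW arr lo ≤ x)
    (hbad : ∀ h : Int, hi < h → h ≤ 2 * x + 1 → ¬ pvW arr h ≤ x) :
    pvRes arr x (pvBLoop (PySem.List.sorted arr (fun a => a))
      (pvPref (PySem.List.sorted arr (fun a => a))) x lo hi) := by
  rw [pvBLoop]
  by_cases hlh : lo < hi
  · rw [dif_pos hlh]
    have hmid := PySem.Int.floordiv_two_mid_bounds (show lo + 1 ≤ hi by omega)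
    have h2 : lo + 1 + hi = lo + hi + 1 := by ring
    rw [h2] at hmid
    show pvRes arr x
      (if pvWater (PySem.List.sorted arr (fun a => a)) (pvPref (PySem.List.sorted arr (fun a => a)))
          (PySem.Int.floordiv (lo + hi + 1) 2) ≤ x then
        pvBLoop (PySem.List.sorted arr (fun a => a)) (pvPref (PySem.List.sorted arr (fun a => a))) x
          (PySem.Int.floordiv (lo + hi + 1) 2) hi
      else
        pvBLoop (PySem.List.sorted arr (fun a => a)) (pvPref (PySem.List.sorted arr (fun a => a))) x lo
          (PySem.Int.floordiv (lo + hi + 1) 2 - 1))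
    set mid := PySem.Int.floordiv (lo + hi + 1) 2 with hmiddef
    rw [pvWater_eq]
    by_cases hg : pvW arr mid ≤ x
    · rw [if_pos hg]
      exact pvBLoop_res arr x mid hi (by omega) (by omega) hhi hg hbad
    · rw [if_neg hg]
      exact pvBLoop_res arr x lo (mid - 1) h0 (by omega) (by omega) hgood
        (fun h h1 h2 hle => hg (le_trans (pvW_mono arr (show mid ≤ h by omega)) hle))
  · rw [dif_neg hlh]
    constructor
    · exact Or.inr ⟨h0, by omega, hgood⟩
    · intro h hh0 hb2 hle
      by_contra hc
      exact hbad h (by omega) hb2 hle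
termination_by (hi - lo).toNat
decreasing_by
  all_goals
    have hmb := PySem.Int.floordiv_two_mid_bounds (show lo + 1 ≤ hi by omega)
    have h2a : lo + 1 + hi = lo + hi + 1 := by ring
    rw [h2a] at hmb
    omega

theorem pvB_res (arr : List Int) (x : Int) : pvRes arr x (custom_binary_search_alt arr x) := by
  unfold custom_binary_search_alt
  by_cases hx : x < 0
  · rw [if_pos hx]
    exact ⟨Or.inl rfl, fun h h0 h1 _ => by omega⟩
  · rw [if_neg hx]
    show pvRes arr x
      (if pvWater (PySem.List.sorted arr (fun a => a)) (pvPref (PySem.List.sorted arr (fun a => a))) 0 > x then -1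
      else pvBLoop (PySem.List.sorted arr (fun a => a)) (pvPref (PySem.List.sorted arr (fun a => a))) x 0 (2 * x + 1))
    rw [pvWater_eq]
    by_cases hw : pvW arr 0 > x
    · rw [if_pos hw]
      refine ⟨Or.inl rfl, fun h h0 h1 hle => ?_⟩
      exact absurd (le_trans (pvW_mono arr h0) hle) (by omega)
    · rw [if_neg hw]
      exact pvBLoop_res arr x 0 (2 * x + 1) le_rfl (by omega) le_rfl (by omega)
        (fun h h1 h2 _ => by omega)

-- ===== VERDICT (by name: the statement is the Claim_ definition above) =====
theorem custom_binary_search_spec : Claim_equal_custom_binary_search := by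
  intro arr x _
  unfold Spec_custom_binary_search
  exact pvRes_unique (pvA_res arr x) (pvB_res arr x)
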